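-- pv_equiv track=rewrite | github.com/Galilevin1/Distress_Microbiome_Analyzing | Models_Analyses.py | rename_microbes
-- ===== SOURCE A (Python) =====
-- def rename_microbes(features):
--     renamed_features = []
--     for feature in features:
--         parts = feature.split(';')
--         Class = next((part.split('__')[1] for part in parts if part.startswith('c__')), '')
--         order = next((part.split('__')[1] for part in parts if part.startswith('o__')), '')
--         family = next((part.split('__')[1] for part in parts if part.startswith('f__')), '')
--         genus = next((part.split('__')[1] for part in parts if part.startswith('g__')), '')
--         species = next((part.split('__')[1] for part in parts if part.startswith('s__')), '')
--         if species != '' and genus != '':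
--             renamed_features.append(f"{genus} (g), {species} (s)")
--         elif species == '' and genus != '':
--             renamed_features.append(f"{genus} (g), __(s)")
--         elif genus == '' and family != '':
--             renamed_features.append(f"{family} (f), __(g), __(s)")
--         elif family == '' and order != '':
--             renamed_features.append(f"{order} (o), __(f), __(g), __(s)")
--         elif order == '':
--             renamed_features.append(f"{Class} (c), __(o), __(f), __(g), __(s)")
--     return renamed_features
-- ===== SOURCE B (Python) =====
-- PREFIXES = ('c__', 'o__', 'f__', 'g__', 's__')
--
-- def rename_microbes(features):
--     renamed = []
--     for feature in features:
--         table = {}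
--         for part in feature.split(';'):
--             for p in PREFIXES:
--                 if part.startswith(p):
--                     table.setdefault(p, part.split('__')[1])
--         c = table.get('c__', '')
--         o = table.get('o__', '')
--         f = table.get('f__', '')
--         g = table.get('g__', '')
--         s = table.get('s__', '')
--         if g and s:
--             renamed.append(f"{g} (g), {s} (s)")
--         elif g:
--             renamed.append(f"{g} (g), __(s)")
--         elif f:
--             renamed.append(f"{f} (f), __(g), __(s)")
--         elif o:
--             renamed.append(f"{o} (o), __(f), __(g), __(s)")
--         else:
--             renamed.append(f"{c} (c), __(o), __(f), __(g), __(s)")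
--     return renamed
-- ===== Notes on version B (the rewrite author's own statement) =====
-- stated objective: simpler
-- what changed: A's five separate next(...) scans of the split parts (one per taxonomy rank) are replaced by a single pass that records the first value seen for each rank prefix in a dict via setdefault, and the five-way elif chain over equalities is collapsed to a shorter if/elif chain on truthiness.
import Mathlib
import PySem

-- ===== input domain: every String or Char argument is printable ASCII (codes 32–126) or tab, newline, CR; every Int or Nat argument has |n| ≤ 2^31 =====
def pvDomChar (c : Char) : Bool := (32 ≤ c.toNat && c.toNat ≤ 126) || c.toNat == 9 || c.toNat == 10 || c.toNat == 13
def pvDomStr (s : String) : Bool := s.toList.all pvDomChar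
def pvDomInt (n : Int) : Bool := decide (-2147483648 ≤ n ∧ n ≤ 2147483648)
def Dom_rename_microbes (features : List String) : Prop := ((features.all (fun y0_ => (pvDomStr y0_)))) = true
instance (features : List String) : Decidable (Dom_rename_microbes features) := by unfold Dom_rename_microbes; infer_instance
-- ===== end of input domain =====

-- B replaces A's five separate scans of `parts` (one next(...) per rank) by a single pass that
-- records the first value seen for each rank prefix in a dict, plus a shorter elif chain; objective: simpler.

-- ===== PORT A =====

-- s.split(sep) for a nonempty literal sep: Str.split? is none only for sep = "", which never occurs here
def pvSplit (s sep : String) : List String := (PySem.Str.split? s sep).getD []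

-- port of `next((part.split('__')[1] for part in parts if part.startswith(pre)), '')`
-- (the index [1] is in range whenever the generator yields, since the part contains '__';
--  pyGetD's default is never reached there)
def pvNextRank (parts : List String) (pre : String) : String :=
  match parts.find? (fun part => PySem.Str.startswith part pre) with
  | some part => PySem.List.pyGetD (pvSplit part "__") 1 ""
  | none => ""

-- loop body of A: one iteration of `for feature in features`
def pvBodyA (renamed : List String) (feature : String) : List String :=
    let parts := pvSplit feature ";"
    let Class := pvNextRank parts "c__"
    let order := pvNextRank parts "o__"
    let family := pvNextRank parts "f__"
    let genus := pvNextRank parts "g__"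
    let species := pvNextRank parts "s__"
    if species ≠ "" ∧ genus ≠ "" then renamed ++ [genus ++ " (g), " ++ species ++ " (s)"]
    else if species = "" ∧ genus ≠ "" then renamed ++ [genus ++ " (g), __(s)"]
    else if genus = "" ∧ family ≠ "" then renamed ++ [family ++ " (f), __(g), __(s)"]
    else if family = "" ∧ order ≠ "" then renamed ++ [order ++ " (o), __(f), __(g), __(s)"]
    else if order = "" then renamed ++ [Class ++ " (c), __(o), __(f), __(g), __(s)"]
    else renamed

def rename_microbes (features : List String) : List String :=
  features.foldl pvBodyA []

-- ===== PORT B =====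

def pvPrefixes : List String := ["c__", "o__", "f__", "g__", "s__"]

-- inner `for p in PREFIXES: if part.startswith(p): table.setdefault(p, part.split('__')[1])`
def pvAddPart (table : PySem.Dict String String) (part : String) : PySem.Dict String String :=
  pvPrefixes.foldl (fun t p =>
    if PySem.Str.startswith part p then
      t.setdefault p (PySem.List.pyGetD (pvSplit part "__") 1 "")
    else t) table

-- loop body of B: one iteration of `for feature in features`
def pvBodyB (renamed : List String) (feature : String) : List String :=
    let table := (pvSplit feature ";").foldl pvAddPart PySem.Dict.empty
    let c := table.getD "c__" ""
    let o := table.getD "o__" ""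
    let f := table.getD "f__" ""
    let g := table.getD "g__" ""
    let s := table.getD "s__" ""
    renamed ++ [
      if g ≠ "" ∧ s ≠ "" then g ++ " (g), " ++ s ++ " (s)"
      else if g ≠ "" then g ++ " (g), __(s)"
      else if f ≠ "" then f ++ " (f), __(g), __(s)"
      else if o ≠ "" then o ++ " (o), __(f), __(g), __(s)"
      else c ++ " (c), __(o), __(f), __(g), __(s)"]

def rename_microbes_alt (features : List String) : List String :=
  features.foldl pvBodyB []

-- ===== PRECONDITION & SPEC =====
def Spec_rename_microbes (features : List String) (out : List String) : Prop := out = rename_microbes_alt features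
instance (features : List String) (out : List String) : Decidable (Spec_rename_microbes features out) := by unfold Spec_rename_microbes; infer_instance

-- ===== CLAIM (what is proved, stated in full; the proofs are below) =====
def Claim_equal_rename_microbes : Prop := ∀ (features : List String), Dom_rename_microbes features → Spec_rename_microbes features (rename_microbes features)

-- ===== LEMMAS AND PROOFS =====

def pvVal (part : String) : String := PySem.List.pyGetD (pvSplit part "__") 1 ""

-- what one pvAddPart step does to the entry of a prefix key
lemma pv_get?_addPart (t : PySem.Dict String String) (part p : String) (hp : p ∈ pvPrefixes) :
    (pvAddPart t part).get? p =
      if PySem.Str.startswith part p then some ((t.get? p).getD (pvVal part)) else t.get? p := by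
  simp only [pvPrefixes, List.mem_cons, List.not_mem_nil, or_false] at hp
  rcases hp with rfl | rfl | rfl | rfl | rfl <;>
    ( simp only [pvAddPart, pvPrefixes, List.foldl_cons, List.foldl_nil, pvVal]
      split_ifs <;>
        simp [PySem.Dict.get?_setdefault_self, PySem.Dict.get?_setdefault_of_ne] )

-- the table built by the single pass reads back as A's first-match scan
lemma pv_get?_fold (parts : List String) (t : PySem.Dict String String) (p : String)
    (hp : p ∈ pvPrefixes) :
    (parts.foldl pvAddPart t).get? p =
      match t.get? p with
      | some v => some v
      | none => (parts.find? (fun part => PySem.Str.startswith part p)).map pvVal := by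
  induction parts generalizing t with
  | nil => cases h : t.get? p <;> simp [h]
  | cons part parts ih =>
    simp only [List.foldl_cons, List.find?]
    rw [ih _, pv_get?_addPart t part p hp]
    simp only [PySem.Str.startswith_eq]
    by_cases hs : PySem.Chars.startswith part.toList p.toList = true
    · cases h : t.get? p <;> simp [hs, pvVal]
    · rw [Bool.not_eq_true] at hs
      cases h : t.get? p <;> simp [hs]

lemma pv_table_getD (parts : List String) (p : String) (hp : p ∈ pvPrefixes) :
    (parts.foldl pvAddPart PySem.Dict.empty).getD p "" = pvNextRank parts p := by
  rw [PySem.Dict.getD_eq_get?_getD, pv_get?_fold parts _ p hp]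
  simp only [PySem.Dict.get?_empty]
  unfold pvNextRank
  cases parts.find? (fun part => PySem.Str.startswith part p) <;> simp [pvVal]

set_option maxHeartbeats 1000000 in
lemma pv_body_eq (renamed : List String) (feature : String) :
    pvBodyA renamed feature = pvBodyB renamed feature := by
  simp only [pvBodyA, pvBodyB]
  rw [pv_table_getD _ "c__" (by simp [pvPrefixes]), pv_table_getD _ "o__" (by simp [pvPrefixes]),
      pv_table_getD _ "f__" (by simp [pvPrefixes]), pv_table_getD _ "g__" (by simp [pvPrefixes]),
      pv_table_getD _ "s__" (by simp [pvPrefixes])]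
  set parts := pvSplit feature ";"
  set c := pvNextRank parts "c__"
  set o := pvNextRank parts "o__"
  set f := pvNextRank parts "f__"
  set g := pvNextRank parts "g__"
  set s := pvNextRank parts "s__"
  by_cases hg : g = "" <;> by_cases hs : s = "" <;> by_cases hf : f = "" <;> by_cases ho : o = "" <;>
    simp [hg, hs, hf, ho]

theorem rename_microbes_spec : Claim_equal_rename_microbes := by
  intro features hdom
  clear hdom
  unfold Spec_rename_microbes rename_microbes rename_microbes_alt
  suffices h : ∀ acc : List String, features.foldl pvBodyA acc = features.foldl pvBodyB acc from h []
  induction features with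
  | nil => intro acc; rfl
  | cons feature fs ih =>
    intro acc
    simp only [List.foldl_cons, pv_body_eq]
    exact ih (pvBodyB acc feature)

-- ===== VERDICT (by name: the statement is the Claim_ definition above) =====
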